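-- pv_equiv track=rewrite | github.com/lushushu137/mooc | 第5周作业/ASCII希尔宾斯基地毯.py | is_blank
-- ===== SOURCE A (Python) =====
-- def is_blank(lines, x, y):
--     if lines == 1:
--         return False
--     elif x in range(lines // 3, lines // 3 * 2) and y in range(
--             lines // 3, lines // 3 * 2):
--         return True
--     else:
--         return is_blank(lines // 3, x % (lines // 3), y % (lines // 3))
-- ===== SOURCE B (Python) =====
-- def is_blank(lines, x, y):
--     while lines != 1:
--         third = lines // 3
--         if x // third == 1 and y // third == 1:
--             return True
--         x %= third
--         y %= third
--         lines = third
--     return False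
-- ===== Notes on version B (the rewrite author's own statement) =====
-- stated objective: simpler
-- what changed: Replaces the recursion with an in-place iterative loop and replaces the two range-membership tests by a single floor-division digit test (x // third == 1), removing the range objects and the recursive calls.
-- outside the precondition, e.g. on is_blank(6, 2, 2): A returns True, B returns True
import Mathlib
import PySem

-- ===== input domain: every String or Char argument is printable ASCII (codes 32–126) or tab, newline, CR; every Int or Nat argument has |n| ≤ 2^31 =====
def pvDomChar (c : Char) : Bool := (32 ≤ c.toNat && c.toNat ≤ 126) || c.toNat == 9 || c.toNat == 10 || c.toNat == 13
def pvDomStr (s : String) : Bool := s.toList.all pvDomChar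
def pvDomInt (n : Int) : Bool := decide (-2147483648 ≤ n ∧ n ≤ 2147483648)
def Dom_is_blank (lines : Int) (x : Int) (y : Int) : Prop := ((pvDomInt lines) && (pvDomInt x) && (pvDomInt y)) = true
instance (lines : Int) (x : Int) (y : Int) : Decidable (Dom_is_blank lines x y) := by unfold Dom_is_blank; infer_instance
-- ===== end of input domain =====

-- B replaces A's recursion by an iterative loop mutating (lines, x, y) and the two
-- range-membership tests by a floor-division digit test; objective: simpler (same cost).

-- ===== PORT A =====
-- fuel = lines.toNat + 1 bounds the recursion depth (the chain lines, lines//3, … is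
-- strictly decreasing while ≥ 1); inside Pre_ the fuel is never exhausted.
def isBlankRecA : Nat → Int → Int → Int → Bool
  | 0, _, _, _ => false      -- unreachable inside Pre_
  | fuel + 1, lines, x, y =>
    if lines = 1 then false
    else if (PySem.Int.floordiv lines 3 ≤ x ∧ x < PySem.Int.floordiv lines 3 * 2) ∧
            (PySem.Int.floordiv lines 3 ≤ y ∧ y < PySem.Int.floordiv lines 3 * 2) then true
    else isBlankRecA fuel (PySem.Int.floordiv lines 3)
           (PySem.Int.mod x (PySem.Int.floordiv lines 3))
           (PySem.Int.mod y (PySem.Int.floordiv lines 3))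

def is_blank (lines : Int) (x : Int) (y : Int) : Bool :=
  isBlankRecA (lines.toNat + 1) lines x y

-- ===== PORT B =====
-- while-loop of Source B as a tail-recursive loop over the mutable state (lines, x, y).
def isBlankLoopB : Nat → Int → Int → Int → Bool
  | 0, _, _, _ => false      -- unreachable inside Pre_
  | fuel + 1, lines, x, y =>
    if lines ≠ 1 then
      let third := PySem.Int.floordiv lines 3
      if PySem.Int.floordiv x third = 1 ∧ PySem.Int.floordiv y third = 1 then true
      else isBlankLoopB fuel third (PySem.Int.mod x third) (PySem.Int.mod y third)
    else false

def is_blank_alt (lines : Int) (x : Int) (y : Int) : Bool :=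
  isBlankLoopB (lines.toNat + 1) lines x y

-- ===== PRECONDITION & SPEC =====
-- Pre_ keeps exactly the sizes on which A's recursion is guaranteed to reach the base
-- case 1 for every coordinate: lines ≥ 1 (otherwise A hits ZeroDivisionError or
-- unbounded recursion) and no value of the chain lines, lines//3, … equals 2
-- (equivalently no k with 2·3^k ≤ lines < 3^(k+1)); on the excluded positive sizes A
-- raises ZeroDivisionError at x % 0 for most coordinates and returns True only when an
-- earlier blank-region test happens to fire, so those sizes are excluded wholesale.
def Pre_is_blank (lines : Int) (x : Int) (y : Int) : Prop :=
  1 ≤ lines ∧ ∀ k : Nat, k < 40 → ¬ (2 * 3 ^ k ≤ lines ∧ lines < 3 ^ (k + 1))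
instance (lines : Int) (x : Int) (y : Int) : Decidable (Pre_is_blank lines x y) := by
  unfold Pre_is_blank; infer_instance

def pvWitness_is_blank : Int × Int × Int := (9, 4, 4)

def Spec_is_blank (lines : Int) (x : Int) (y : Int) (out : Bool) : Prop := out = is_blank_alt lines x y
instance (lines : Int) (x : Int) (y : Int) (out : Bool) : Decidable (Spec_is_blank lines x y out) := by unfold Spec_is_blank; infer_instance

-- ===== CLAIM (what is proved, stated in full; the proofs are below) =====
def Claim_equal_is_blank : Prop := ∀ (lines : Int) (x : Int) (y : Int), Dom_is_blank lines x y → Pre_is_blank lines x y → Spec_is_blank lines x y (is_blank lines x y)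

-- ===== LEMMAS AND PROOFS =====

-- the chain condition of Pre_, as a predicate on the size alone
def pvGood (lines : Int) : Prop :=
  ∀ k : Nat, k < 40 → ¬ (2 * 3 ^ k ≤ lines ∧ lines < 3 ^ (k + 1))

-- inside Pre_, a size ≠ 1 is ≥ 3
lemma pvGood_ge_three {lines : Int} (h1 : 1 ≤ lines) (hg : pvGood lines)
    (hne : lines ≠ 1) : 3 ≤ lines := by
  have h0 := hg 0 (by norm_num)
  simp only [pow_zero, mul_one] at h0
  omega

-- the digit test of B equals the range test of A (third ≥ 1)
lemma pvDigit_iff {t x : Int} (ht : 1 ≤ t) :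
    PySem.Int.floordiv x t = 1 ↔ (t ≤ x ∧ x < t * 2) := by
  rw [PySem.Int.floordiv_eq_iff_of_pos (by omega)]
  constructor <;> intro h <;> constructor <;> omega

-- the chain condition is preserved by one step lines ↦ lines // 3
lemma pvGood_step {lines : Int} (h3 : 3 ≤ lines) (hle : lines ≤ 2147483648)
    (hg : pvGood lines) : pvGood (PySem.Int.floordiv lines 3) := by
  intro k hk ⟨hlo, hhi⟩
  rw [PySem.Int.le_floordiv_iff_mul_le (by norm_num)] at hlo
  rw [PySem.Int.floordiv_lt_iff_lt_mul (by norm_num)] at hhi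
  by_cases hk39 : k < 39
  · exact hg (k + 1) (by omega) ⟨by ring_nf at hlo ⊢; omega,
      by ring_nf at hhi ⊢; omega⟩
  · -- k = 39: 2·3^39·3 ≤ lines contradicts lines ≤ 2^31
    have hk' : k = 39 := by omega
    subst hk'
    norm_num at hlo
    omega

lemma pvThird_lt {lines : Int} (h3 : 3 ≤ lines) :
    PySem.Int.floordiv lines 3 < lines := by
  rw [PySem.Int.floordiv_lt_iff_lt_mul (by norm_num)]; omega

lemma pvThird_ge_one {lines : Int} (h3 : 3 ≤ lines) :
    1 ≤ PySem.Int.floordiv lines 3 := by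
  rw [PySem.Int.le_floordiv_iff_mul_le (by norm_num)]; omega

-- main step: with enough fuel the two loops agree on every size admitted by Pre_
lemma pvMain : ∀ fuel : Nat, ∀ lines x y : Int, 1 ≤ lines → lines ≤ 2147483648 →
    pvGood lines → lines.toNat < fuel →
    isBlankRecA fuel lines x y = isBlankLoopB fuel lines x y := by
  intro fuel
  induction fuel with
  | zero => intro lines x y _ _ _ h; omega
  | succ f ih =>
    intro lines x y h1 hle hg hfuel
    by_cases hone : lines = 1
    · subst hone; simp [isBlankRecA, isBlankLoopB]
    · have h3 : 3 ≤ lines := pvGood_ge_three h1 hg hone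
      have ht1 : 1 ≤ PySem.Int.floordiv lines 3 := pvThird_ge_one h3
      have htlt : PySem.Int.floordiv lines 3 < lines := pvThird_lt h3
      simp only [isBlankRecA, isBlankLoopB, if_neg hone, if_pos (show lines ≠ 1 from hone)]
      have hiff : (PySem.Int.floordiv x (PySem.Int.floordiv lines 3) = 1 ∧
            PySem.Int.floordiv y (PySem.Int.floordiv lines 3) = 1) ↔
          ((PySem.Int.floordiv lines 3 ≤ x ∧ x < PySem.Int.floordiv lines 3 * 2) ∧
            (PySem.Int.floordiv lines 3 ≤ y ∧ y < PySem.Int.floordiv lines 3 * 2)) := by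
        rw [pvDigit_iff ht1, pvDigit_iff ht1]
      by_cases hb : ((PySem.Int.floordiv lines 3 ≤ x ∧ x < PySem.Int.floordiv lines 3 * 2) ∧
          (PySem.Int.floordiv lines 3 ≤ y ∧ y < PySem.Int.floordiv lines 3 * 2))
      · rw [if_pos hb, if_pos (hiff.mpr hb)]
      · rw [if_neg hb, if_neg (fun h => hb (hiff.mp h))]
        exact ih _ _ _ ht1 (by omega) (pvGood_step h3 hle hg) (by omega)

-- ===== VERDICT (by name: the statement is the Claim_ definition above) =====
theorem is_blank_spec : Claim_equal_is_blank := by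
  intro lines x y hdom hpre
  unfold Spec_is_blank is_blank is_blank_alt
  have hdom' : lines ≤ 2147483648 := by
    simp only [Dom_is_blank, pvDomInt, Bool.and_eq_true, decide_eq_true_eq] at hdom
    exact hdom.1.1.2
  exact pvMain (lines.toNat + 1) lines x y hpre.1 hdom' hpre.2 (by omega)
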